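-- pv_equiv track=rewrite | github.com/iyzg/tsumu | scripts/anki_utils.py | parse_structured_fact
-- ===== SOURCE A (Python) =====
-- def parse_structured_fact(text: str) -> dict:
--     """Parse a structured fact with multi-line values."""
--     lines = text.strip().split('\n')
--     fact = {}
--     current_key = None
--     current_value = []
--
--     for line in lines:
--         # Check if line starts a new field
--         if ':' in line and not line.startswith(' '):
--             if current_key:
--                 fact[current_key] = '\n'.join(current_value).strip()
--
--             parts = line.split(':', 1)
--             current_key = parts[0].strip().lower()
--             current_value = [parts[1].strip()] if len(parts) > 1 else []
--         else:
--             # Continuation of previous field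
--             current_value.append(line.strip())
--
--     # Don't forget the last field
--     if current_key:
--         fact[current_key] = '\n'.join(current_value).strip()
--
--     return fact
-- ===== SOURCE B (Python) =====
-- def _is_start(line):
--     return ':' in line and not line.startswith(' ')
--
--
-- def parse_structured_fact(text: str) -> dict:
--     """Parse a structured fact with multi-line values, segment by segment."""
--     lines = text.strip().split('\n')
--     # drop preamble lines before the first field header
--     while lines and not _is_start(lines[0]):
--         lines = lines[1:]
--     fact = {}
--     while lines:
--         header, rest = lines[0], lines[1:]
--         cont = []
--         while rest and not _is_start(rest[0]):
--             cont.append(rest[0])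
--             rest = rest[1:]
--         parts = header.split(':', 1)
--         key = parts[0].strip().lower()
--         if key:
--             value = '\n'.join([parts[1].strip()] + [ln.strip() for ln in cont])
--             fact[key] = value.strip()
--         lines = rest
--     return fact
-- ===== Notes on version B (the rewrite author's own statement) =====
-- stated objective: alternative
-- what changed: Replaces A's single pass carrying (current_key, current_value) state with end-of-loop flush by a two-phase segmentation: drop the preamble, then repeatedly take one whole field segment (header plus following continuation lines) and build its value locally, with no carried state or final flush.
import Mathlib
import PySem

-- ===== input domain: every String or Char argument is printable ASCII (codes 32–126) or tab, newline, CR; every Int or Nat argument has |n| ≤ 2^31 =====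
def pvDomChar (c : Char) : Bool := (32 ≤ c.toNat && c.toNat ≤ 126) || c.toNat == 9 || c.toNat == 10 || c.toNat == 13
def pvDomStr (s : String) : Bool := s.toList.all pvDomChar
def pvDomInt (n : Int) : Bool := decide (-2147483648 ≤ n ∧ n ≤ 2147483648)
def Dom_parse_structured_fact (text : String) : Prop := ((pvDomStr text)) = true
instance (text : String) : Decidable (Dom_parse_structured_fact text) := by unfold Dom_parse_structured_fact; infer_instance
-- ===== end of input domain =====

-- B re-implements A's carry-state line loop as a two-phase segmentation (drop the
-- preamble, then process one whole field segment at a time); alternative decomposition,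
-- same cost, return values provably identical on all inputs.

-- ===== PORT A =====
-- the body of A's for-loop over lines, state = (fact, current_key, current_value);
-- Python's 'if current_key:' is 'some k with k ≠ ""' (None and "" are falsy)
def psfStep (s : PySem.Dict String String × Option String × List String) (line : String) :
    PySem.Dict String String × Option String × List String :=
  if PySem.Str.isIn ":" line && !(PySem.Str.startswith line " ") then
    let fact' :=
      match s.2.1 with
      | some k => if k ≠ "" then s.1.insert k (PySem.Str.strip (PySem.Str.join "\n" s.2.2)) else s.1
      | none => s.1
    let parts := (PySem.Str.splitMax? line ":" 1).getD []
    (fact', some (PySem.Str.lower (PySem.Str.strip (parts.getD 0 ""))),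
      if parts.length > 1 then [PySem.Str.strip (parts.getD 1 "")] else [])
  else
    (s.1, s.2.1, s.2.2 ++ [PySem.Str.strip line])

def parse_structured_fact (text : String) : List (String × String) :=
  let lines := (PySem.Str.split? (PySem.Str.strip text) "\n").getD []
  let s := lines.foldl psfStep (PySem.Dict.empty, none, [])
  -- "Don't forget the last field"
  (match s.2.1 with
   | some k => if k ≠ "" then s.1.insert k (PySem.Str.strip (PySem.Str.join "\n" s.2.2)) else s.1
   | none => s.1).items

-- ===== PORT B =====
def psfIsStart (line : String) : Bool :=
  PySem.Str.isIn ":" line && !(PySem.Str.startswith line " ")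

-- B's outer while loop: lines starts with a field header; the segment = header plus
-- the continuation lines up to the next header
def psfSegs : List String → PySem.Dict String String → PySem.Dict String String
  | [], fact => fact
  | header :: rest, fact =>
    let cont := rest.takeWhile (fun l => !psfIsStart l)
    let rest' := rest.dropWhile (fun l => !psfIsStart l)
    let parts := (PySem.Str.splitMax? header ":" 1).getD []
    let key := PySem.Str.lower (PySem.Str.strip (parts.getD 0 ""))
    psfSegs rest'
      (if key ≠ "" then
        fact.insert key (PySem.Str.strip (PySem.Str.join "\n"
          (PySem.Str.strip (parts.getD 1 "") :: cont.map PySem.Str.strip)))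
      else fact)
termination_by ls _ => ls.length
decreasing_by simpa using Nat.lt_succ_of_le (List.length_dropWhile_le _ _)

def parse_structured_fact_alt (text : String) : List (String × String) :=
  let lines := (PySem.Str.split? (PySem.Str.strip text) "\n").getD []
  (psfSegs (lines.dropWhile (fun l => !psfIsStart l)) PySem.Dict.empty).items

-- ===== PRECONDITION & SPEC =====
def Spec_parse_structured_fact (text : String) (out : List (String × String)) : Prop := out = parse_structured_fact_alt text
instance (text : String) (out : List (String × String)) : Decidable (Spec_parse_structured_fact text out) := by unfold Spec_parse_structured_fact; infer_instance

-- ===== CLAIM (what is proved, stated in full; the proofs are below) =====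
def Claim_equal_parse_structured_fact : Prop := ∀ (text : String), Dom_parse_structured_fact text → Spec_parse_structured_fact text (parse_structured_fact text)

-- ===== LEMMAS AND PROOFS =====

-- A's end-of-field flush ('if current_key: fact[current_key] = …'), proof-side only
def psfFlush (fact : PySem.Dict String String) (ck : Option String) (cv : List String) :
    PySem.Dict String String :=
  match ck with
  | some k => if k ≠ "" then fact.insert k (PySem.Str.strip (PySem.Str.join "\n" cv)) else fact
  | none => fact

lemma psf_go_zero (l cur : List Char) (acc : List (List Char)) (fuel : Nat) :
    (PySem.Chars.splitOnMax.go [':'] fuel 0 l cur acc).length = acc.length + 1 := by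
  cases fuel with
  | zero => simp [PySem.Chars.splitOnMax.go]
  | succ f => cases l <;> simp [PySem.Chars.splitOnMax.go]

lemma psf_go_one (fuel : Nat) : ∀ (l cur : List Char) (acc : List (List Char)),
    l.length < fuel →
    (PySem.Chars.splitOnMax.go [':'] fuel 1 l cur acc).length
      = acc.length + (if [':'] <:+: l then 2 else 1) := by
  induction fuel with
  | zero => intro l cur acc h; omega
  | succ f ih =>
    intro l cur acc h
    cases l with
    | nil => simp [PySem.Chars.splitOnMax.go]
    | cons c rest =>
      by_cases hp : [':'].isPrefixOf (c :: rest) = true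
      · have : (PySem.Chars.splitOnMax.go [':'] (f + 1) 1 (c :: rest) cur acc)
            = PySem.Chars.splitOnMax.go [':'] f 0 (List.drop 1 (c :: rest)) [] (cur.reverse :: acc) := by
          simp [PySem.Chars.splitOnMax.go, hp]
        rw [this, psf_go_zero]
        have hinf : [':'] <:+: c :: rest :=
          (List.infix_cons_iff).mpr (Or.inl (List.isPrefixOf_iff_prefix.mp hp))
        simp [hinf]
      · have hc : c ≠ ':' := by
          intro hc; apply hp; simp [hc, List.isPrefixOf]
        have : (PySem.Chars.splitOnMax.go [':'] (f + 1) 1 (c :: rest) cur acc)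
            = PySem.Chars.splitOnMax.go [':'] f 1 rest (c :: cur) acc := by
          simp [PySem.Chars.splitOnMax.go, hp]
        rw [this, ih rest (c :: cur) acc (by simpa using Nat.lt_of_succ_lt_succ h)]
        have : ([':'] <:+: c :: rest) ↔ ([':'] <:+: rest) := by
          rw [List.infix_cons_iff]
          constructor
          · rintro (hpre | hinf)
            · exact absurd (List.isPrefixOf_iff_prefix.mpr hpre) hp
            · exact hinf
          · exact Or.inr
        simp [this]

-- a line containing ':' splits with maxsplit 1 into exactly two parts
lemma psf_parts_two (line : String) (h : PySem.Str.isIn ":" line = true) :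
    ((PySem.Str.splitMax? line ":" 1).getD []).length = 2 := by
  have hinf : (":".toList) <:+: line.toList := by
    have := (PySem.Chars.isIn_iff_infix (sub := ":".toList) (s := line.toList)).mp (by simpa using h)
    exact this
  have hsep : (":".toList) = [':'] := rfl
  rw [hsep] at hinf
  simp only [PySem.Str.splitMax?, PySem.Chars.splitMax?, hsep]
  norm_num [PySem.Chars.splitOnMax]
  rw [psf_go_one _ _ _ _ (by simp)]
  simp [hinf]

-- the loop invariant: running A's fold from state (fact, ck, cv) and flushing at the end
-- equals flushing the pending field extended by the upcoming continuation lines and then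
-- processing the remaining segments B-style
lemma psf_loop (ls : List String) (fact : PySem.Dict String String)
    (ck : Option String) (cv : List String) :
    (let s := ls.foldl psfStep (fact, ck, cv); psfFlush s.1 s.2.1 s.2.2)
      = psfSegs (ls.dropWhile (fun l => !psfIsStart l))
          (psfFlush fact ck (cv ++ (ls.takeWhile (fun l => !psfIsStart l)).map PySem.Str.strip)) := by
  induction ls generalizing fact ck cv with
  | nil => simp [psfSegs]
  | cons l ls ih =>
    by_cases hs : psfIsStart l = true
    · have hisin : PySem.Str.isIn ":" l = true := by
        unfold psfIsStart at hs
        exact (Bool.and_eq_true _ _).mp hs |>.1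
      have hstep : psfStep (fact, ck, cv) l
          = (psfFlush fact ck cv,
             some (PySem.Str.lower (PySem.Str.strip
               (((PySem.Str.splitMax? l ":" 1).getD []).getD 0 ""))),
             [PySem.Str.strip (((PySem.Str.splitMax? l ":" 1).getD []).getD 1 "")]) := by
        unfold psfStep psfFlush psfIsStart at *
        rw [if_pos hs]
        have : ((PySem.Str.splitMax? l ":" 1).getD []).length > 1 := by
          rw [psf_parts_two l hisin]; omega
        simp [this]
      rw [List.foldl_cons, hstep, ih]
      rw [List.dropWhile_cons_of_neg (by simp [hs]), List.takeWhile_cons_of_neg (by simp [hs])]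
      conv_rhs => rw [psfSegs]
      simp [psfFlush]
    · have hstep : psfStep (fact, ck, cv) l = (fact, ck, cv ++ [PySem.Str.strip l]) := by
        unfold psfStep psfIsStart at *
        rw [if_neg (by simpa using hs)]
      rw [List.foldl_cons, hstep, ih]
      rw [List.dropWhile_cons_of_pos (by simp [hs]), List.takeWhile_cons_of_pos (by simp [hs])]
      simp

-- ===== VERDICT (by name: the statement is the Claim_ definition above) =====
theorem parse_structured_fact_spec : Claim_equal_parse_structured_fact := by
  intro text _
  unfold Spec_parse_structured_fact parse_structured_fact parse_structured_fact_alt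
  have := psf_loop ((PySem.Str.split? (PySem.Str.strip text) "\n").getD [])
    PySem.Dict.empty none []
  simp only [psfFlush] at this
  simp only []
  rw [← this]
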